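-- pv_equiv track=rewrite | github.com/DavidCoenFish/game05 | tools/python/drag_drop_ww_cpp_style/abstract_syntax_tree/transform_ast_cpp.py | AdjustInclude
-- ===== SOURCE A (Python) =====
-- def AdjustInclude(in_path_spec):
--     in_path_spec = in_path_spec.replace("\\", "/")
--     result = ""
--     prev_c = "/"
--     for c in in_path_spec:
--         if c.isupper():
--             if prev_c != "/":
--                 result += "_"
--             c = c.lower()
--         result += c
--         prev_c = c
--     return result
-- ===== SOURCE B (Python) =====
-- def AdjustInclude(in_path_spec):
--     def seg_fix(seg):
--         marked = seg[:1] + "".join("_" + c if c.isupper() else c for c in seg[1:])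
--         return marked.lower()
--     return "/".join(seg_fix(seg) for seg in in_path_spec.replace("\\", "/").split("/"))
-- ===== Notes on version B (the rewrite author's own statement) =====
-- stated objective: alternative
-- what changed: Replaces A's single stateful scan carrying prev_c with a split/map/join pipeline: split on '/', per segment concatenate an underscore before each non-initial uppercase and then lowercase the whole segment, and rejoin with '/'.
import Mathlib
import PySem

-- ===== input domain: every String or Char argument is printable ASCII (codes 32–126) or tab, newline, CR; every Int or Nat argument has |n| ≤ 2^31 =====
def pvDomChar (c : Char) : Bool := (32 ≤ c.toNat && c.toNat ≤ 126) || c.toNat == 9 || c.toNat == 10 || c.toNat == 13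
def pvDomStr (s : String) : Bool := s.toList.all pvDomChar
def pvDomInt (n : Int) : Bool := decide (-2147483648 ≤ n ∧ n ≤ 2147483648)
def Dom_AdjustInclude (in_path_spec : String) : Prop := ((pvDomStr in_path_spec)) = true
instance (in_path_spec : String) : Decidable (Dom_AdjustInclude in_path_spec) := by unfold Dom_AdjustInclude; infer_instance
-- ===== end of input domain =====

-- B replaces A's single stateful scan (result/prev_c accumulator) by a split/map/join pipeline:
-- split on '/', fix each segment independently, rejoin; objective: alternative decomposition.

-- ===== PORT A =====
-- A's loop over the characters carrying (result, prev_c); result as a List Char, built in order.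
def AdjustInclude (in_path_spec : String) : String :=
  let s := PySem.Str.replace in_path_spec "\\" "/"
  let st := s.toList.foldl
    (fun (st : List Char × Char) c =>
      if PySem.Chars.isupper c then
        let r := if st.2 ≠ '/' then st.1 ++ ['_'] else st.1
        (r ++ [PySem.Chars.lowerChar c], PySem.Chars.lowerChar c)
      else (st.1 ++ [c], c))
    ([], '/')
  String.ofList st.1

-- ===== PORT B =====
-- Source B's seg_fix: seg[:1] + "".join("_"+c if c.isupper() else c for c in seg[1:]), then .lower()
def pvSegFix (seg : List Char) : List Char :=
  PySem.Chars.lower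
    (PySem.List.slice seg none (some 1) ++
      (PySem.List.slice seg (some 1) none).flatMap
        (fun c => if PySem.Chars.isupper c then ['_', c] else [c]))

-- Source B: "/".join(seg_fix(seg) for seg in s.replace("\\","/").split("/"))
def AdjustInclude_alt (in_path_spec : String) : String :=
  let s := PySem.Str.replace in_path_spec "\\" "/"
  String.ofList (PySem.Chars.join ['/'] ((PySem.Chars.splitOn s.toList ['/']).map pvSegFix))

-- ===== PRECONDITION & SPEC =====
def Spec_AdjustInclude (in_path_spec : String) (out : String) : Prop := out = AdjustInclude_alt in_path_spec
instance (in_path_spec : String) (out : String) : Decidable (Spec_AdjustInclude in_path_spec out) := by unfold Spec_AdjustInclude; infer_instance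

-- ===== CLAIM (what is proved, stated in full; the proofs are below) =====
def Claim_equal_AdjustInclude : Prop := ∀ (in_path_spec : String), Dom_AdjustInclude in_path_spec → Spec_AdjustInclude in_path_spec (AdjustInclude in_path_spec)

-- ===== LEMMAS AND PROOFS =====

-- Character facts
theorem pv_isupper_ne_slash {c : Char} (h : PySem.Chars.isupper c = true) : c ≠ '/' := by
  intro hc; subst hc; simp [PySem.Chars.isupper] at h

theorem pv_lower_of_not_upper {c : Char} (h : ¬ PySem.Chars.isupper c = true) :
    PySem.Chars.lowerChar c = c := by
  simp [PySem.Chars.lowerChar, h]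

theorem pv_lower_underscore : PySem.Chars.lowerChar '_' = '_' := by decide

theorem pv_lower_ne_slash {c : Char} (h : PySem.Chars.isupper c = true) :
    PySem.Chars.lowerChar c ≠ '/' := by
  have h' := h
  simp only [PySem.Chars.isupper, Bool.and_eq_true, decide_eq_true_eq] at h'
  obtain ⟨h1, h2⟩ := h'
  have hA : 65 ≤ c.toNat := h1
  have hZ : c.toNat ≤ 90 := h2
  simp only [PySem.Chars.lowerChar]
  rw [if_pos h]
  intro hc
  have hvalid : Nat.isValidChar (c.toNat + 32) := Or.inl (by omega)
  have hv : (Char.ofNat (c.toNat + 32)).toNat = c.toNat + 32 := by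
    rw [Char.toNat_ofNat, if_pos hvalid]
  have h47 := congrArg Char.toNat hc
  rw [hv] at h47
  have : ('/' : Char).toNat = 47 := rfl
  omega

-- Common recursive form: process the list with the ORIGINAL previous character p ('/' at start).
def pvGB (p : Char) : List Char → List Char
  | [] => []
  | c :: cs =>
    (if PySem.Chars.isupper c then
      (if p ≠ '/' then ['_'] else []) ++ [PySem.Chars.lowerChar c]
    else [c]) ++ pvGB c cs

-- A's foldl equals pvGB, with state prev_c = q related to the original previous char p.
theorem pv_foldA_eq (cs : List Char) :
    ∀ (acc : List Char) (q p : Char), (q = '/' ↔ p = '/') →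
    (cs.foldl
      (fun (st : List Char × Char) c =>
        if PySem.Chars.isupper c then
          let r := if st.2 ≠ '/' then st.1 ++ ['_'] else st.1
          (r ++ [PySem.Chars.lowerChar c], PySem.Chars.lowerChar c)
        else (st.1 ++ [c], c))
      (acc, q)).1 = acc ++ pvGB p cs := by
  induction cs with
  | nil => intro acc q p _; simp [pvGB]
  | cons c cs ih =>
    intro acc q p hqp
    by_cases hu : PySem.Chars.isupper c = true
    · simp only [List.foldl_cons, hu, if_pos, pvGB]
      rw [ih _ _ c ⟨fun h => absurd h (pv_lower_ne_slash hu),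
                    fun h => absurd h (pv_isupper_ne_slash hu)⟩]
      by_cases hq : q = '/'
      · have hp : p = '/' := hqp.mp hq
        simp [hq, hp]
      · have hp : p ≠ '/' := fun h => hq (hqp.mpr h)
        simp [hq, hp]
    · simp only [List.foldl_cons, hu, if_neg, Bool.not_eq_true, pvGB]
      rw [ih _ _ c Iff.rfl]
      simp

-- Recursive split on '/': (first segment, remaining segments)
def pvSplitSlash : List Char → List Char × List (List Char)
  | [] => ([], [])
  | c :: cs =>
    let r := pvSplitSlash cs
    if c = '/' then ([], r.1 :: r.2) else (c :: r.1, r.2)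

theorem pv_go_spec (fuel : Nat) :
    ∀ (l cur : List Char) (acc : List (List Char)), l.length ≤ fuel →
    PySem.Chars.splitOn.go ['/'] fuel l cur acc =
      acc.reverse ++ ((cur.reverse ++ (pvSplitSlash l).1) :: (pvSplitSlash l).2) := by
  induction fuel with
  | zero =>
    intro l cur acc hl
    have : l = [] := List.eq_nil_of_length_eq_zero (Nat.le_zero.mp hl)
    subst this
    simp [PySem.Chars.splitOn.go, pvSplitSlash]
  | succ fuel ih =>
    intro l cur acc hl
    cases l with
    | nil => simp [PySem.Chars.splitOn.go, pvSplitSlash]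
    | cons c rest =>
      have hstep : PySem.Chars.splitOn.go ['/'] (fuel+1) (c :: rest) cur acc =
          (if c = '/' then PySem.Chars.splitOn.go ['/'] fuel rest [] (cur.reverse :: acc)
           else PySem.Chars.splitOn.go ['/'] fuel rest (c :: cur) acc) := by
        simp only [PySem.Chars.splitOn.go, List.isPrefixOf, Bool.and_true, beq_iff_eq]
        by_cases hc : c = '/'
        · rw [if_pos hc.symm, if_pos hc]; simp
        · rw [if_neg (fun h => hc h.symm), if_neg hc]
      have hrest : rest.length ≤ fuel := by simpa using Nat.succ_le_succ_iff.mp hl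
      rw [hstep]
      by_cases hc : c = '/'
      · rw [if_pos hc, ih rest [] (cur.reverse :: acc) hrest]
        simp [pvSplitSlash, hc]
      · rw [if_neg hc, ih rest (c :: cur) acc hrest]
        simp [pvSplitSlash, hc]

theorem pv_splitOn_eq (l : List Char) :
    PySem.Chars.splitOn l ['/'] = (pvSplitSlash l).1 :: (pvSplitSlash l).2 := by
  unfold PySem.Chars.splitOn
  rw [pv_go_spec (l.length + 1) l [] [] (by omega)]
  simp

-- join as head ++ flatMap over the tail
theorem pv_join_eq (xs : List (List Char)) :
    ∀ x, PySem.Chars.join ['/'] (x :: xs) = x ++ xs.flatMap (fun y => '/' :: y) := by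
  induction xs with
  | nil => intro x; simp [PySem.Chars.join_singleton]
  | cons y ys ih =>
    intro x
    rw [PySem.Chars.join_cons_cons, ih y]
    simp

def pvMark (c : Char) : List Char := if PySem.Chars.isupper c then ['_', c] else [c]

def pvSegHead (seg : List Char) : List Char :=
  (seg.take 1 ++ (seg.drop 1).flatMap pvMark).map PySem.Chars.lowerChar

def pvSegInner (seg : List Char) : List Char :=
  (seg.flatMap pvMark).map PySem.Chars.lowerChar

theorem pv_segFix_eq (seg : List Char) : pvSegFix seg = pvSegHead seg := by
  unfold pvSegFix pvSegHead pvMark PySem.Chars.lower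
  rw [PySem.List.slice_to seg (by norm_num), PySem.List.slice_from seg (by norm_num)]
  rfl

-- Main bridge: pvGB equals the per-segment pipeline.
theorem pv_gb_eq_split (cs : List Char) :
    ∀ p, pvGB p cs =
      (if p = '/' then pvSegHead else pvSegInner) (pvSplitSlash cs).1 ++
        ((pvSplitSlash cs).2.map pvSegHead).flatMap (fun y => '/' :: y) := by
  induction cs with
  | nil =>
    intro p
    simp only [pvGB, pvSplitSlash, List.map_nil, List.flatMap_nil, List.append_nil]
    split_ifs <;> rfl
  | cons c cs ih =>
    intro p
    have h0 : ∀ q : Char, (if q = '/' then pvSegHead else pvSegInner) ([] : List Char) = [] := by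
      intro q; split_ifs <;> rfl
    by_cases hc : c = '/'
    · subst hc
      have hu : ¬ PySem.Chars.isupper '/' = true := by decide
      simp only [pvGB, hu, if_neg, Bool.not_eq_true, pvSplitSlash]
      rw [ih '/']
      simp [h0]
    · simp only [pvGB, pvSplitSlash, if_neg hc]
      rw [ih c]
      simp only [if_neg hc]
      by_cases hp : p = '/'
      · subst hp
        by_cases hu : PySem.Chars.isupper c = true
        · simp [hu, pvSegHead, pvSegInner]
        · simp [hu, pvSegHead, pvSegInner, pv_lower_of_not_upper hu]
      · simp only [if_neg hp]
        by_cases hu : PySem.Chars.isupper c = true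
        · simp [hu, hp, pvSegInner, pvMark, pv_lower_underscore]
        · simp [hu, pvSegInner, pvMark, pv_lower_of_not_upper hu]

theorem pv_segFix_funeq : pvSegFix = pvSegHead := funext pv_segFix_eq

-- ===== VERDICT (by name: the statement is the Claim_ definition above) =====
theorem AdjustInclude_spec : Claim_equal_AdjustInclude := by
  intro s _
  unfold Spec_AdjustInclude AdjustInclude AdjustInclude_alt
  have hA := pv_foldA_eq (PySem.Str.replace s "\\" "/").toList [] '/' '/' Iff.rfl
  simp only [List.nil_append] at hA
  simp only [hA, pv_splitOn_eq, pv_segFix_funeq, List.map_cons]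
  rw [pv_join_eq, pv_gb_eq_split _ '/', if_pos rfl]
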